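-- pv_equiv track=rewrite | github.com/miliar/Code_Jam_Webscraper | solutions_python/solutions_year12_round4_nr2/25.py | order_r
-- ===== SOURCE A (Python) =====
-- def order_r (r):
--     r2 = r[:]
--     o = []
--     while (sum(r2)):
--         arms = max(r2)
--         index = r2.index(arms)
--         r2[index] = 0
--         o.append((arms,index))
--     return o
-- ===== SOURCE B (Python) =====
-- def order_r(r):
--     out = []
--     for v in sorted(set(x for x in r if x > 0), reverse=True):
--         for i, x in enumerate(r):
--             if x == v:
--                 out.append((v, i))
--     return out
-- ===== Notes on version B (the rewrite author's own statement) =====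
-- stated objective: alternative
-- what changed: Instead of repeatedly scanning a mutated copy with max()/index() and zeroing out the chosen cell, B computes the distinct positive values once, sorts them descending, and emits (value, index) pairs by one enumerate-scan per distinct value; Pre_ restricts to the problem's natural domain of non-negative lists, since on lists with a negative entry A's sum()-terminated loop may diverge or return a partial/negative listing while B lists the positive entries.
-- outside the precondition, e.g. on order_r([1, -1]): A returns [], B returns [(1, 0)]; on order_r([-1]): A returns [(-1, 0)], B returns []; on order_r([-1, 0]): A does not finish within the time limit, B returns []
import Mathlib
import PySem

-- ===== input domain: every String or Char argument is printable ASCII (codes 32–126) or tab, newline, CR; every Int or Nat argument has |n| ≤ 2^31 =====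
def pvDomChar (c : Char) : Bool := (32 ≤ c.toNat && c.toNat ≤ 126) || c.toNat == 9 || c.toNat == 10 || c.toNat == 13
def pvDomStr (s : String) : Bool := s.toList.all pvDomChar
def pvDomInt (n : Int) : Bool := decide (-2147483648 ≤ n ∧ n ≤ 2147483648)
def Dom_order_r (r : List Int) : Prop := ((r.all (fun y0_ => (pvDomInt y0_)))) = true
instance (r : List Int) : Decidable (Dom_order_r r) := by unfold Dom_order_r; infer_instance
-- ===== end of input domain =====

-- B lists the nonzero entries as (value, index) sorted by descending value then ascending index,
-- by one enumerate-scan per distinct positive value instead of A's repeated max/index scans over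
-- a mutated copy (objective: alternative, no speed claim).

-- ===== PORT A =====
-- while(sum(r2)): arms = max(r2); index = r2.index(arms); r2[index] = 0; o.append((arms,index))
-- fuel makes the loop total in Lean; inside Pre_ (all entries ≥ 0) each iteration zeroes one
-- positive entry, so fuel = r.length + 1 is never exhausted there.
def order_r_loop : Nat → List Int → List (Int × Int) → List (Int × Int)
  | 0, _, o => o
  | (fuel+1), r2, o =>
    if r2.sum = 0 then o
    else
      match PySem.List.max? r2 (fun x => x) with
      | none => o   -- unreachable: sum ≠ 0 means r2 ≠ []
      | some arms =>
        match PySem.List.index? r2 arms with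
        | none => o -- unreachable: arms ∈ r2
        | some idx => order_r_loop fuel (r2.set idx 0) (o ++ [(arms, (idx : Int))])

def order_r (r : List Int) : List (Int × Int) :=
  order_r_loop (r.length + 1) r []

-- ===== PORT B =====
-- for v in sorted(set(x for x in r if x > 0), reverse=True): for i, x in enumerate(r): if x == v: out.append((v, i))
def order_r_alt (r : List Int) : List (Int × Int) :=
  (PySem.List.sorted (PySem.Set.ofList (r.filter (fun x => decide (0 < x)))) (fun x => x) true).foldl
    (fun out v =>
      (PySem.List.enumerate r 0).foldl
        (fun out p => if p.2 == v then out ++ [(v, p.1)] else out) out)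
    []

-- ===== PRECONDITION & SPEC =====
-- Pre_ restricts to the problem's natural domain of non-negative lists: on a negative entry A's sum()-terminated loop may diverge
-- ([-1,0]), stop early with a partial list ([1,-1] returns []), or list negative values, while B,
-- written for the problem's natural domain of non-negative counts, lists the positive entries.
def Pre_order_r (r : List Int) : Prop := ∀ x ∈ r, 0 ≤ x
instance (r : List Int) : Decidable (Pre_order_r r) := by unfold Pre_order_r; infer_instance

def pvWitness_order_r : List Int := [3, 1, 3, 0, 2]

def Spec_order_r (r : List Int) (out : List (Int × Int)) : Prop := out = order_r_alt r
instance (r : List Int) (out : List (Int × Int)) : Decidable (Spec_order_r r out) := by unfold Spec_order_r; infer_instance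

-- ===== CLAIM (what is proved, stated in full; the proofs are below) =====
def Claim_equal_order_r : Prop := ∀ (r : List Int), Dom_order_r r → Pre_order_r r → Spec_order_r r (order_r r)

-- ===== LEMMAS AND PROOFS =====

-- B's two folds, named: the distinct positive values sorted descending, and the scan for one value.
def valsB (r : List Int) : List Int :=
  PySem.List.sorted (PySem.Set.ofList (r.filter (fun x => decide (0 < x)))) (fun x => x) true

def segB (r : List Int) (v : Int) : List (Int × Int) :=
  ((PySem.List.enumerate r 0).filter (fun p => p.2 == v)).map (fun p => (v, p.1))

theorem order_r_alt_eq (r : List Int) : order_r_alt r = (valsB r).flatMap (segB r) := by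
  unfold order_r_alt valsB segB
  have h1 := PySem.List.foldl_congr_mem
    (l := PySem.List.sorted (PySem.Set.ofList (r.filter (fun x => decide (0 < x)))) (fun x => x) true)
    (init := ([] : List (Int × Int)))
    (f := fun out v => (PySem.List.enumerate r 0).foldl
        (fun out p => if p.2 == v then out ++ [(v, p.1)] else out) out)
    (g := fun out v => out ++ ((PySem.List.enumerate r 0).filter (fun p => p.2 == v)).map (fun p => (v, p.1)))
    (fun out v _ => PySem.List.foldl_append_if _ _ _ _)
  rw [h1]
  simpa using PySem.List.foldl_append_eq_flatMap
    (fun v => ((PySem.List.enumerate r 0).filter (fun p => p.2 == v)).map (fun p => (v, p.1))) _ []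

theorem sortedRev_ofList_pairwise_gt (l : List Int) :
    (PySem.List.sorted (PySem.Set.ofList l) (fun x => x) true).Pairwise (fun a b => b < a) := by
  have h1 := PySem.List.sorted_pairwise_rev (PySem.Set.ofList l) (fun x => x)
  have h2 : (PySem.List.sorted (PySem.Set.ofList l) (fun x => x) true).Nodup :=
    (PySem.List.sorted_perm (PySem.Set.ofList l) (fun x => x) true).nodup_iff.mpr
      (PySem.Set.nodup_ofList l)
  exact (h1.and h2).imp (fun h => lt_of_le_of_ne h.1 (Ne.symm h.2))

theorem segB_nil (r : List Int) (v : Int) (h : ∀ x ∈ r, x ≠ v) : segB r v = [] := by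
  unfold segB
  rw [List.filter_eq_nil_iff.mpr, List.map_nil]
  intro p hp
  obtain ⟨k, hk, rfl⟩ := (PySem.List.mem_enumerate_iff r 0 p).mp hp
  simpa using h _ (List.getElem_mem hk)

theorem segB_ne (pre suf : List Int) (a b v : Int) (ha : a ≠ v) (hb : b ≠ v) :
    segB (pre ++ a :: suf) v = segB (pre ++ b :: suf) v := by
  unfold segB
  rw [PySem.List.enumerate_append, PySem.List.enumerate_append,
    PySem.List.enumerate_cons, PySem.List.enumerate_cons]
  simp [List.filter_append, ha, hb]

theorem segB_head (pre suf : List Int) (arms : Int) (h0 : (0 : Int) ≠ arms) (hnp : arms ∉ pre) :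
    segB (pre ++ arms :: suf) arms = (arms, (pre.length : Int)) :: segB (pre ++ 0 :: suf) arms := by
  unfold segB
  have hfp : ∀ s : Int, (PySem.List.enumerate pre s).filter (fun p => p.2 == arms) = [] := by
    intro s
    rw [List.filter_eq_nil_iff]
    intro p hp
    obtain ⟨k, hk, rfl⟩ := (PySem.List.mem_enumerate_iff pre s p).mp hp
    have hne : pre[k] ≠ arms := fun h => hnp (h ▸ List.getElem_mem hk)
    simpa using hne
  rw [PySem.List.enumerate_append, PySem.List.enumerate_append,
    PySem.List.enumerate_cons, PySem.List.enumerate_cons]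
  simp [List.filter_append, hfp, h0]

theorem crux (pre suf : List Int) (arms : Int) (hpos : 0 < arms) (hnp : arms ∉ pre)
    (hmax : ∀ y ∈ pre ++ arms :: suf, y ≤ arms) :
    order_r_alt (pre ++ arms :: suf) = (arms, (pre.length : Int)) :: order_r_alt (pre ++ 0 :: suf) := by
  have h0arms : (0 : Int) ≠ arms := by omega
  rw [order_r_alt_eq, order_r_alt_eq]
  unfold valsB
  have hfil : (pre ++ arms :: suf).filter (fun x => decide (0 < x))
      = pre.filter (fun x => decide (0 < x)) ++ arms :: suf.filter (fun x => decide (0 < x)) := by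
    simp [List.filter_append, hpos]
  have hfil' : (pre ++ 0 :: suf).filter (fun x => decide (0 < x))
      = pre.filter (fun x => decide (0 < x)) ++ suf.filter (fun x => decide (0 < x)) := by
    simp [List.filter_append]
  have hmemS : ∀ x, x ∈ PySem.Set.ofList ((pre ++ arms :: suf).filter (fun x => decide (0 < x)))
      ↔ x ∈ pre.filter (fun x => decide (0 < x)) ∨ x = arms
        ∨ x ∈ suf.filter (fun x => decide (0 < x)) := by
    intro x
    rw [PySem.Set.mem_ofList, hfil]
    simp
  have hmemS' : ∀ x, x ∈ PySem.Set.ofList ((pre ++ 0 :: suf).filter (fun x => decide (0 < x)))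
      ↔ x ∈ pre.filter (fun x => decide (0 < x)) ∨ x ∈ suf.filter (fun x => decide (0 < x)) := by
    intro x
    rw [PySem.Set.mem_ofList, hfil']
    simp
  have hfp_mem : ∀ x ∈ pre.filter (fun x => decide (0 < x)), x ∈ pre ∧ 0 < x := by
    intro x hx; rw [List.mem_filter] at hx; simpa using hx
  have hfs_mem : ∀ x ∈ suf.filter (fun x => decide (0 < x)), x ∈ suf ∧ 0 < x := by
    intro x hx; rw [List.mem_filter] at hx; simpa using hx
  have hposS : ∀ x, x ∈ PySem.Set.ofList ((pre ++ arms :: suf).filter (fun x => decide (0 < x)))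
      → 0 < x := by
    intro x hx
    rcases (hmemS x).mp hx with h | h | h
    · exact (hfp_mem x h).2
    · omega
    · exact (hfs_mem x h).2
  have hleS : ∀ x, x ∈ PySem.Set.ofList ((pre ++ arms :: suf).filter (fun x => decide (0 < x)))
      → x ≤ arms := by
    intro x hx
    rcases (hmemS x).mp hx with h | h | h
    · exact hmax x (List.mem_append_left _ (hfp_mem x h).1)
    · omega
    · exact hmax x (List.mem_append_right _ (List.mem_cons_of_mem _ (hfs_mem x h).1))
  by_cases hmem : arms ∈ suf.filter (fun x => decide (0 < x))
  · -- arms occurs again after the zeroed position: the distinct-value lists coincide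
    have hperm : (PySem.Set.ofList ((pre ++ 0 :: suf).filter (fun x => decide (0 < x)))).Perm
        (PySem.Set.ofList ((pre ++ arms :: suf).filter (fun x => decide (0 < x)))) := by
      rw [List.perm_ext_iff_of_nodup (PySem.Set.nodup_ofList _) (PySem.Set.nodup_ofList _)]
      intro a
      rw [hmemS, hmemS']
      constructor
      · tauto
      · rintro (h | rfl | h) <;> tauto
    have hLL : PySem.List.sorted
          (PySem.Set.ofList ((pre ++ arms :: suf).filter (fun x => decide (0 < x)))) (fun x => x) true
        = PySem.List.sorted
          (PySem.Set.ofList ((pre ++ 0 :: suf).filter (fun x => decide (0 < x)))) (fun x => x) true :=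
      PySem.List.sorted_rev_eq_of_perm_of_pairwise_gt _ _ _
        ((PySem.List.sorted_perm _ _ true).trans hperm) (sortedRev_ofList_pairwise_gt _)
    have harmsS : arms ∈ PySem.Set.ofList ((pre ++ arms :: suf).filter (fun x => decide (0 < x))) :=
      (hmemS arms).mpr (Or.inr (Or.inl rfl))
    obtain ⟨T, hT⟩ : ∃ T, PySem.List.sorted
        (PySem.Set.ofList ((pre ++ arms :: suf).filter (fun x => decide (0 < x)))) (fun x => x) true
        = arms :: T := by
      have hms := (PySem.List.mem_sorted _ (fun x : Int => x) true arms).mpr harmsS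
      cases hL : PySem.List.sorted
          (PySem.Set.ofList ((pre ++ arms :: suf).filter (fun x => decide (0 < x)))) (fun x => x) true with
      | nil => rw [hL] at hms; cases hms
      | cons a T =>
        have h1 : a ≤ arms := hleS a ((PySem.List.mem_sorted _ _ true a).mp (hL ▸ List.mem_cons_self))
        have h2 : arms ≤ a := PySem.List.key_head_sorted_rev_ge _ _ hL arms harmsS
        exact ⟨T, by rw [le_antisymm h2 h1]⟩
    have hndT : arms ∉ T := by
      have hnd : (arms :: T).Nodup :=
        hT ▸ ((PySem.List.sorted_perm _ (fun x : Int => x) true).nodup_iff.mpr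
          (PySem.Set.nodup_ofList _))
      exact (List.nodup_cons.mp hnd).1
    have hTmem : ∀ v ∈ T, v ∈ PySem.Set.ofList
        ((pre ++ arms :: suf).filter (fun x => decide (0 < x))) := fun v hv =>
      (PySem.List.mem_sorted _ _ true v).mp (hT ▸ List.mem_cons_of_mem _ hv)
    rw [hT, ← hLL, hT, List.flatMap_cons, List.flatMap_cons, segB_head pre suf arms h0arms hnp]
    have hTcong : T.flatMap (segB (pre ++ arms :: suf)) = T.flatMap (segB (pre ++ 0 :: suf)) := by
      rw [List.flatMap_def, List.flatMap_def, List.map_congr_left]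
      intro v hv
      have hvpos := hposS v (hTmem v hv)
      exact segB_ne pre suf arms 0 v (fun h => hndT (h ▸ hv)) (by omega)
    rw [hTcong]
    simp
  · -- arms was the last remaining occurrence: it drops out of the distinct-value list
    have hnS' : arms ∉ PySem.Set.ofList ((pre ++ 0 :: suf).filter (fun x => decide (0 < x))) := by
      rw [hmemS']
      rintro (h | h)
      · exact hnp (hfp_mem arms h).1
      · exact hmem h
    have hperm : (arms :: PySem.List.sorted
          (PySem.Set.ofList ((pre ++ 0 :: suf).filter (fun x => decide (0 < x)))) (fun x => x) true).Perm
        (PySem.Set.ofList ((pre ++ arms :: suf).filter (fun x => decide (0 < x)))) := by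
      rw [List.perm_ext_iff_of_nodup ?_ (PySem.Set.nodup_ofList _)]
      · intro a
        rw [List.mem_cons, PySem.List.mem_sorted, hmemS, hmemS']
        constructor
        · rintro (rfl | h | h) <;> tauto
        · tauto
      · rw [List.nodup_cons]
        exact ⟨fun h => hnS' ((PySem.List.mem_sorted _ _ true arms).mp h),
          (PySem.List.sorted_perm _ (fun x : Int => x) true).nodup_iff.mpr
            (PySem.Set.nodup_ofList _)⟩
    have hpw : (arms :: PySem.List.sorted
        (PySem.Set.ofList ((pre ++ 0 :: suf).filter (fun x => decide (0 < x)))) (fun x => x) true).Pairwise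
        (fun a b => b < a) := by
      rw [List.pairwise_cons]
      refine ⟨?_, sortedRev_ofList_pairwise_gt _⟩
      intro y hy
      have hyS' := (PySem.List.mem_sorted _ (fun x : Int => x) true y).mp hy
      have h1 : y ≤ arms := by
        rcases (hmemS' y).mp hyS' with h | h
        · exact hmax y (List.mem_append_left _ (hfp_mem y h).1)
        · exact hmax y (List.mem_append_right _ (List.mem_cons_of_mem _ (hfs_mem y h).1))
      have h2 : y ≠ arms := fun h => hnS' (h ▸ hyS')
      omega
    have hL : PySem.List.sorted
        (PySem.Set.ofList ((pre ++ arms :: suf).filter (fun x => decide (0 < x)))) (fun x => x) true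
        = arms :: PySem.List.sorted
          (PySem.Set.ofList ((pre ++ 0 :: suf).filter (fun x => decide (0 < x)))) (fun x => x) true :=
      PySem.List.sorted_rev_eq_of_perm_of_pairwise_gt _ _ _ hperm hpw
    rw [hL, List.flatMap_cons, segB_head pre suf arms h0arms hnp]
    have hseg0 : segB (pre ++ 0 :: suf) arms = [] := by
      apply segB_nil
      intro x hx
      rcases List.mem_append.mp hx with h | h
      · exact fun he => hnp (he ▸ h)
      · rcases List.mem_cons.mp h with rfl | h
        · omega
        · intro he
          exact hmem (List.mem_filter.mpr ⟨he ▸ h, by simpa using hpos⟩)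
    have hcong : (PySem.List.sorted
          (PySem.Set.ofList ((pre ++ 0 :: suf).filter (fun x => decide (0 < x)))) (fun x => x) true).flatMap
          (segB (pre ++ arms :: suf))
        = (PySem.List.sorted
          (PySem.Set.ofList ((pre ++ 0 :: suf).filter (fun x => decide (0 < x)))) (fun x => x) true).flatMap
          (segB (pre ++ 0 :: suf)) := by
      rw [List.flatMap_def, List.flatMap_def, List.map_congr_left]
      intro v hv
      have hvS' := (PySem.List.mem_sorted _ (fun x : Int => x) true v).mp hv
      have hvpos : 0 < v := by
        rcases (hmemS' v).mp hvS' with h | h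
        · exact (hfp_mem v h).2
        · exact (hfs_mem v h).2
      exact segB_ne pre suf arms 0 v (fun h => hnS' (h ▸ hvS')) (by omega)
    rw [hseg0, hcong]
    simp

theorem loop_acc (fuel : Nat) (r2 : List Int) (o : List (Int × Int)) :
    order_r_loop fuel r2 o = o ++ order_r_loop fuel r2 [] := by
  induction fuel generalizing r2 o with
  | zero => simp [order_r_loop]
  | succ n ih =>
    simp only [order_r_loop]
    split
    · simp
    · cases hm : PySem.List.max? r2 (fun x => x) with
      | none => simp
      | some arms =>
        cases hi : PySem.List.index? r2 arms with
        | none => simp only [PySem.List.index?_eq_idxOf?] at hi; simp [hi]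
        | some idx =>
          simp only [hi]
          rw [ih, ih, ih (r2.set idx 0) ([] ++ [(arms, (idx : Int))])]
          simp

theorem alt_of_no_pos (l : List Int) (h : ∀ x ∈ l, ¬ 0 < x) : order_r_alt l = [] := by
  rw [order_r_alt_eq]
  unfold valsB
  have hf : l.filter (fun x => decide (0 < x)) = [] :=
    List.filter_eq_nil_iff.mpr (by intro x hx; simpa using h x hx)
  rw [hf, show PySem.Set.ofList ([] : List Int) = [] from rfl,
    (PySem.List.sorted_eq_nil_iff ([] : List Int) (fun x => x) true).mpr rfl]
  rfl

theorem nonneg_sum_zero (l : List Int) (hnn : ∀ x ∈ l, 0 ≤ x) (hs : l.sum = 0) :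
    ∀ x ∈ l, x = 0 := by
  induction l with
  | nil => simp
  | cons a t ih =>
    have h1 : 0 ≤ a := hnn a List.mem_cons_self
    have h2 : 0 ≤ t.sum := List.sum_nonneg (fun x hx => hnn x (List.mem_cons_of_mem a hx))
    rw [List.sum_cons] at hs
    intro x hx
    rcases List.mem_cons.mp hx with rfl | hx'
    · omega
    · exact ih (fun y hy => hnn y (List.mem_cons_of_mem a hy)) (by omega) x hx'

theorem loop_main (fuel : Nat) (r2 : List Int) (hnn : ∀ x ∈ r2, 0 ≤ x)
    (hf : r2.countP (fun x => decide (0 < x)) ≤ fuel) :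
    order_r_loop fuel r2 [] = order_r_alt r2 := by
  induction fuel generalizing r2 with
  | zero =>
    have hz : ∀ x ∈ r2, ¬ 0 < x := by
      intro x hx hlt
      have : 0 < r2.countP (fun x => decide (0 < x)) :=
        List.countP_pos_iff.mpr ⟨x, hx, by simpa using hlt⟩
      omega
    rw [alt_of_no_pos r2 hz]
    rfl
  | succ n ih =>
    by_cases hs : r2.sum = 0
    · have hz : ∀ x ∈ r2, ¬ 0 < x := by
        intro x hx
        have := nonneg_sum_zero r2 hnn hs x hx
        omega
      rw [alt_of_no_pos r2 hz]
      simp [order_r_loop, hs]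
    · obtain ⟨x, hxmem, hx⟩ : ∃ x ∈ r2, 0 < x := by
        by_contra h
        push Not at h
        exact hs (List.sum_eq_zero (fun y hy => le_antisymm (h y hy) (hnn y hy)))
      have hne : r2 ≠ [] := by rintro rfl; cases hxmem
      obtain ⟨arms, hm⟩ : ∃ a, PySem.List.max? r2 (fun x => x) = some a := by
        cases h : PySem.List.max? r2 (fun x => x) with
        | none => exact absurd ((PySem.List.max?_eq_none_iff r2 _).mp h) hne
        | some a => exact ⟨a, rfl⟩
      have harms_mem : arms ∈ r2 := PySem.List.max?_mem hm
      have harms_max : ∀ y ∈ r2, y ≤ arms := PySem.List.max?_isMax hm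
      have harms_pos : 0 < arms := lt_of_lt_of_le hx (harms_max x hxmem)
      obtain ⟨idx, hi⟩ : ∃ k, PySem.List.index? r2 arms = some k := by
        have hsome := (PySem.List.index?_isSome_iff r2 arms).mpr harms_mem
        cases h : PySem.List.index? r2 arms with
        | none => rw [h] at hsome; cases hsome
        | some k => exact ⟨k, rfl⟩
      obtain ⟨pre, suf, hr2, hlen, hnp⟩ := (PySem.List.index?_eq_some_iff r2 arms idx).mp hi
      have hset : r2.set idx 0 = pre ++ 0 :: suf := by
        rw [hr2, ← hlen, List.set_append_right _ _ (Nat.le_refl _)]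
        simp
      have hloop : order_r_loop (n + 1) r2 [] =
          (arms, (idx : Int)) :: order_r_loop n (r2.set idx 0) [] := by
        simp only [order_r_loop, hs, if_false, hm, hi]
        rw [loop_acc]
        simp
      have hnn' : ∀ y ∈ r2.set idx 0, 0 ≤ y := by
        rw [hset]
        intro y hy
        rcases List.mem_append.mp hy with h | h
        · exact hnn y (hr2 ▸ List.mem_append_left _ h)
        · rcases List.mem_cons.mp h with rfl | h
          · omega
          · exact hnn y (hr2 ▸ List.mem_append_right _ (List.mem_cons_of_mem _ h))
      have hcnt : (r2.set idx 0).countP (fun x => decide (0 < x)) ≤ n := by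
        rw [hr2] at hf
        rw [hset]
        simp [List.countP_append, harms_pos] at hf ⊢
        omega
      rw [hloop, ih _ hnn' hcnt, hset, hr2, ← hlen]
      exact (crux pre suf arms harms_pos hnp (hr2 ▸ harms_max)).symm

-- ===== VERDICT (by name: the statement is the Claim_ definition above) =====
theorem order_r_spec : Claim_equal_order_r := by
  intro r _ hpre
  unfold Spec_order_r order_r
  exact loop_main _ r hpre (le_trans List.countP_le_length (Nat.le_succ _))
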